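-- pv_equiv track=rewrite | github.com/AaLexUser/Compiler-development | HW2/main.py | parse
-- ===== SOURCE A (Python) =====
-- def parse(str: str):
--     adjacency = {
--         1 : {"b" : 3, "a" : 2 },
--         2 : {"b" : 4, "c" : 4 },
--         3 : {"c" : 5},
--         4 : {},
--         5 : {"c" : 5}
--     }
--     final_states = [1,3,4,5]
--
--     current_state = 1
--
--     for sym in str:
--         if sym in adjacency[current_state]:
--             current_state = adjacency[current_state][sym]
--         else:
--             return False
--     if current_state in final_states:
--         return True
--     else: return False
-- ===== SOURCE B (Python) =====
-- def parse(str: str):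
--     # Closed-form recognition of the DFA's language: "" | a[bc] | bc*
--     if str == "":
--         return True
--     if str[0] == "a":
--         return len(str) == 2 and str[1] in "bc"
--     if str[0] == "b":
--         return all(c == "c" for c in str[1:])
--     return False
-- ===== Notes on version B (the rewrite author's own statement) =====
-- stated objective: simpler
-- what changed: Replaced the DFA state-machine walk over a transition table with a closed-form check of the recognized language (empty | a[bc] | bc*).
import Mathlib
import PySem

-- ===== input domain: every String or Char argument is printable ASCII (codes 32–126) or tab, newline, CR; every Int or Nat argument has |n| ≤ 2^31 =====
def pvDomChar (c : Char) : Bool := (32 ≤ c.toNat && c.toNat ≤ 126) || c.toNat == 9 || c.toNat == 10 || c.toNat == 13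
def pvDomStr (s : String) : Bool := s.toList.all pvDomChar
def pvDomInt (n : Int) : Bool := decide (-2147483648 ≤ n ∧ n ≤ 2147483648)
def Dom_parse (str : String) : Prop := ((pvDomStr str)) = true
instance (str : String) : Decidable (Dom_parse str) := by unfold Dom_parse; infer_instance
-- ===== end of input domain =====

-- B replaces A's DFA table-walk with a closed-form check of the language "" | a[bc] | bc* (simpler).


-- ===== PORT A =====
-- the adjacency dict: adjacency[state][sym], none = 'sym not in adjacency[current_state]'
def parseAdj (st : Int) (sym : Char) : Option Int :=
  if st = 1 then (if sym = 'b' then some 3 else if sym = 'a' then some 2 else none)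
  else if st = 2 then (if sym = 'b' then some 4 else if sym = 'c' then some 4 else none)
  else if st = 3 then (if sym = 'c' then some 5 else none)
  else if st = 4 then none
  else if st = 5 then (if sym = 'c' then some 5 else none)
  else none

-- the for-loop with early 'return False', then the final-state check
def parseLoop (st : Int) : List Char → Bool
  | [] => decide (st = 1 ∨ st = 3 ∨ st = 4 ∨ st = 5)
  | sym :: rest =>
      match parseAdj st sym with
      | some st' => parseLoop st' rest
      | none => false

def parse (str : String) : Bool := parseLoop 1 str.toList

-- ===== PORT B =====
def parse_alt (str : String) : Bool :=
  match str.toList with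
  | [] => true
  | 'a' :: rest => match rest with
      | [c] => c == 'b' || c == 'c'
      | _ => false
  | 'b' :: rest => rest.all (fun c => c == 'c')
  | _ => false

-- ===== PRECONDITION & SPEC =====
def Spec_parse (str : String) (out : Bool) : Prop := out = parse_alt str
instance (str : String) (out : Bool) : Decidable (Spec_parse str out) := by unfold Spec_parse; infer_instance

-- ===== CLAIM (what is proved, stated in full; the proofs are below) =====
def Claim_equal_parse : Prop := ∀ (str : String), Dom_parse str → Spec_parse str (parse str)

-- ===== LEMMAS AND PROOFS =====

-- from state 5 (and 3) the DFA accepts exactly all-'c' suffixes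
theorem parseLoop_five (l : List Char) : parseLoop 5 l = l.all (fun c => c == 'c') := by
  induction l with
  | nil => decide
  | cons c rest ih =>
      by_cases h : c = 'c' <;>
        simp [parseLoop, parseAdj, h, ih, List.all_cons]

theorem parseLoop_three (l : List Char) : parseLoop 3 l = l.all (fun c => c == 'c') := by
  cases l with
  | nil => decide
  | cons c rest =>
      by_cases h : c = 'c' <;>
        simp [parseLoop, parseAdj, h, parseLoop_five, List.all_cons]

-- from state 4 nothing more is read
theorem parseLoop_four (l : List Char) : parseLoop 4 l = l.isEmpty := by
  cases l <;> simp [parseLoop, parseAdj]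

-- from state 2 exactly one 'b' or 'c' is accepted
theorem parseLoop_two (l : List Char) :
    parseLoop 2 l = (match l with | [c] => c == 'b' || c == 'c' | _ => false) := by
  cases l with
  | nil => decide
  | cons c rest =>
      by_cases hb : c = 'b'
      · simp [parseLoop, parseAdj, hb, parseLoop_four]
        cases rest <;> simp
      · by_cases hc : c = 'c'
        · simp [parseLoop, parseAdj, hc, parseLoop_four]
          cases rest <;> simp
        · cases rest <;> simp [parseLoop, parseAdj, hb, hc]

-- ===== VERDICT (by name: the statement is the Claim_ definition above) =====
theorem parse_spec : Claim_equal_parse := by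
  intro str _
  unfold Spec_parse parse parse_alt
  cases hl : str.toList with
  | nil => decide
  | cons c rest =>
      by_cases ha : c = 'a'
      · simp [parseLoop, parseAdj, ha, parseLoop_two]
      · by_cases hb : c = 'b'
        · simp [parseLoop, parseAdj, hb, parseLoop_three]
        · simp [parseLoop, parseAdj, ha, hb]
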